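-- pv_equiv track=rewrite | github.com/HzTTT/ustomor-qc-app | app/daily_summary.py | _format_attachments_short
-- ===== SOURCE A (Python) =====
-- def _format_attachments_short(atts: object) -> str:
--     """Render attachments in a compact, human-friendly way.
--
--     We intentionally avoid the old placeholder like "[attachments]". If we
--     have meaningful metadata (type/url/name/summary), we surface it; otherwise
--     we keep a simple count.
--     """
--     if not atts:
--         return ""
--
--     items = []
--     if isinstance(atts, list):
--         items = atts
--     elif isinstance(atts, dict):
--         items = [atts]
--     else:
--         return ""
--
--     # We only keep *meaningful* attachments for the daily input.
--     # In Taobao/Leyan exports, it's common to see "meta" attachments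
--     # (e.g. type=meta) which are not useful for summarization.
--     # We suppress those entirely.
--     images_count = 0
--     files_count = 0
--     system_cards: list[str] = []
--     other_types: dict[str, int] = {}
--
--     for it in items:
--         if not isinstance(it, dict):
--             continue
--         # Skip noisy meta-only blobs
--         t_raw = str(it.get("type") or "").strip().lower()
--         if (not t_raw) and any(str(k).lower().startswith("meta") for k in it.keys()):
--             # Examples: {"meta": "meta1"} / {"meta_id": "..."}
--             continue
--
--         t = t_raw or "unknown"
--
--         if t in ("meta", "metadata") or t.startswith("meta_"):
--             continue
--
--         if t == "image":
--             # The daily AI input is plain text; image URLs are not useful.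
--             # We only keep a count.
--             images_count += 1
--             continue
--         if t in ("file", "doc", "document"):
--             # Same reason as images: links are not useful in a pure-text AI prompt.
--             files_count += 1
--             continue
--         if t == "system_card":
--             summary = str(it.get("summary") or "").strip()
--             card_type = str(it.get("card_type") or "").strip()
--             if summary and card_type:
--                 system_cards.append(f"{card_type}: {summary}")
--             elif summary:
--                 system_cards.append(summary)
--             elif card_type:
--                 system_cards.append(card_type)
--             else:
--                 system_cards.append("")
--             continue
--
--         other_types[t] = other_types.get(t, 0) + 1
--
--     parts: list[str] = []
--     if images_count:
--         parts.append(f"图片{images_count}")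
--
--     if files_count:
--         parts.append(f"文件{files_count}")
--
--     if system_cards:
--         summaries = [s for s in system_cards if s]
--         if summaries and len(summaries) <= 2:
--             parts.append("系统卡片: " + " | ".join(summaries))
--         else:
--             parts.append(f"系统卡片{len(system_cards)}")
--
--     if other_types:
--         for k in sorted(other_types.keys()):
--             parts.append(f"{k}{other_types[k]}")
--
--     if not parts:
--         # attachments exist, but after filtering meta/noise we have nothing meaningful
--         return ""
--
--     out = "附件：" + "；".join(parts)
--     # prevent extremely long lines (urls etc.)
--     if len(out) > 500:
--         out = out[:497] + "..."
--     return out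
-- ===== SOURCE B (Python) =====
-- def _format_attachments_short(atts: object) -> str:
--     """Bucket-free re-implementation: classify each item once into a normalized
--     type, then derive every count/section from that list of types."""
--     if not atts:
--         return ""
--     if isinstance(atts, list):
--         items = atts
--     elif isinstance(atts, dict):
--         items = [atts]
--     else:
--         return ""
--
--     def _norm_type(it):
--         t = str(it.get("type") or "").strip().lower()
--         if not t and any(str(k).lower().startswith("meta") for k in it.keys()):
--             return None
--         t = t or "unknown"
--         if t in ("meta", "metadata") or t.startswith("meta_"):
--             return None
--         return t
--
--     typed = [(_norm_type(it), it) for it in items if isinstance(it, dict)]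
--     typed = [(t, it) for (t, it) in typed if t is not None]
--     ts = [t for (t, _) in typed]
--
--     images_count = ts.count("image")
--     files_count = ts.count("file") + ts.count("doc") + ts.count("document")
--
--     def _card_text(it):
--         summary = str(it.get("summary") or "").strip()
--         card_type = str(it.get("card_type") or "").strip()
--         if summary and card_type:
--             return card_type + ": " + summary
--         return summary or card_type
--
--     cards = [_card_text(it) for (t, it) in typed if t == "system_card"]
--     others = [t for t in ts if t not in ("image", "file", "doc", "document", "system_card")]
--
--     if cards:
--         summaries = [s for s in cards if s]
--         if summaries and len(summaries) <= 2:
--             card_part = ["系统卡片: " + " | ".join(summaries)]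
--         else:
--             card_part = [f"系统卡片{len(cards)}"]
--     else:
--         card_part = []
--
--     parts = (
--         ([f"图片{images_count}"] if images_count else [])
--         + ([f"文件{files_count}"] if files_count else [])
--         + card_part
--         + [f"{k}{others.count(k)}" for k in sorted(dict.fromkeys(others))]
--     )
--
--     if not parts:
--         return ""
--     out = "附件：" + "；".join(parts)
--     if len(out) > 500:
--         out = out[:497] + "..."
--     return out
-- ===== Notes on version B (the rewrite author's own statement) =====
-- stated objective: alternative
-- what changed: A threads one stateful loop that mutates four accumulators (two counters, a list, a counting dict) and then appends to parts step by step; B instead normalizes each item's type once into a flat (type, item) list and derives every section from it by independent count/filter/comprehension passes (sorted(dict.fromkeys(..)) + list.count replacing the counting dict), assembling parts as a single concatenation.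
import Mathlib
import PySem

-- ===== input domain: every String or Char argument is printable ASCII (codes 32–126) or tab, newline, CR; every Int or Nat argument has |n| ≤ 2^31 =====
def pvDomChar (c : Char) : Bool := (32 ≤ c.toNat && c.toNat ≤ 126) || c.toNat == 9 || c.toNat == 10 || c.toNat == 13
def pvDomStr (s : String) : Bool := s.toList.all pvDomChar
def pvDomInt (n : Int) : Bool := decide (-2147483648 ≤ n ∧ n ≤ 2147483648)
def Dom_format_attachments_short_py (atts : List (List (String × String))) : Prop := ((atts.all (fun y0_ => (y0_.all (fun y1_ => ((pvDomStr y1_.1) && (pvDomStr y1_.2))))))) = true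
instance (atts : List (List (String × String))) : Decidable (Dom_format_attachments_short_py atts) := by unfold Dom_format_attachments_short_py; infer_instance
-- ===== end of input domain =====

-- B restructures A's single four-accumulator loop into classify-once + independent aggregate passes; same result (alternative decomposition, not faster).
-- Each inner `List (String × String)` models a Python dict; both ports read it through `PySem.Dict.ofList` (dict construction: last duplicate wins).

-- ===== PORT A =====
-- A's per-item loop body (the four accumulators: images_count, files_count, system_cards, other_types).
def pvStepA (s : Int × Int × List String × PySem.Dict String Int) (it : List (String × String)) :
    Int × Int × List String × PySem.Dict String Int :=
  let d := PySem.Dict.ofList it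
  let t_raw := PySem.Str.lower (PySem.Str.strip ((d.get? "type").getD ""))
  if t_raw = "" ∧ d.keys.any (fun k => PySem.Str.startswith (PySem.Str.lower k) "meta") then s
  else
    let t := if t_raw = "" then "unknown" else t_raw
    if t = "meta" ∨ t = "metadata" ∨ PySem.Str.startswith t "meta_" = true then s
    else if t = "image" then (s.1 + 1, s.2.1, s.2.2.1, s.2.2.2)
    else if t = "file" ∨ t = "doc" ∨ t = "document" then (s.1, s.2.1 + 1, s.2.2.1, s.2.2.2)
    else if t = "system_card" then
      let summary := PySem.Str.strip ((d.get? "summary").getD "")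
      let card_type := PySem.Str.strip ((d.get? "card_type").getD "")
      let c :=
        if summary ≠ "" ∧ card_type ≠ "" then card_type ++ ": " ++ summary
        else if summary ≠ "" then summary
        else if card_type ≠ "" then card_type
        else ""
      (s.1, s.2.1, s.2.2.1 ++ [c], s.2.2.2)
    else (s.1, s.2.1, s.2.2.1, s.2.2.2.insert t (s.2.2.2.getD t 0 + 1))

def format_attachments_short_py (atts : List (List (String × String))) : String :=
  if atts = [] then ""  -- `if not atts: return ""`; the isinstance branches are vacuous at this type (always a list of dicts)
  else
    let st := atts.foldl pvStepA (0, 0, [], PySem.Dict.empty)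
    let images_count := st.1
    let files_count := st.2.1
    let system_cards := st.2.2.1
    let other_types := st.2.2.2
    let parts : List String := []
    let parts := if images_count ≠ 0 then parts ++ ["图片" ++ PySem.Int.toStr images_count] else parts
    let parts := if files_count ≠ 0 then parts ++ ["文件" ++ PySem.Int.toStr files_count] else parts
    let parts :=
      if system_cards ≠ [] then
        let summaries := system_cards.filter (fun s => s ≠ "")
        if summaries ≠ [] ∧ summaries.length ≤ 2 then
          parts ++ ["系统卡片: " ++ PySem.Str.join " | " summaries]
        else parts ++ ["系统卡片" ++ PySem.Int.toStr (system_cards.length : Int)]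
      else parts
    let parts :=
      if other_types.items ≠ [] then
        -- `other_types[k]` ported as getD: k ranges over the dict's own keys, so the lookup never raises
        parts ++ (PySem.List.sorted other_types.keys (fun x => x) false).map
          (fun k => k ++ PySem.Int.toStr (other_types.getD k 0))
      else parts
    if parts = [] then ""
    else
      let out := "附件：" ++ PySem.Str.join "；" parts
      if 500 < PySem.Str.len out then PySem.Str.slice out none (some 497) ++ "..." else out

-- ===== PORT B =====
-- `_norm_type`: the normalized type of an item, `none` when A's loop skips it.
def pvNormType (it : List (String × String)) : Option String :=
  let d := PySem.Dict.ofList it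
  let t_raw := PySem.Str.lower (PySem.Str.strip ((d.get? "type").getD ""))
  if t_raw = "" ∧ d.keys.any (fun k => PySem.Str.startswith (PySem.Str.lower k) "meta") then none
  else
    let t := if t_raw = "" then "unknown" else t_raw
    if t = "meta" ∨ t = "metadata" ∨ PySem.Str.startswith t "meta_" = true then none
    else some t

-- `_card_text`
def pvCardText (it : List (String × String)) : String :=
  let d := PySem.Dict.ofList it
  let summary := PySem.Str.strip ((d.get? "summary").getD "")
  let card_type := PySem.Str.strip ((d.get? "card_type").getD "")
  if summary ≠ "" ∧ card_type ≠ "" then card_type ++ ": " ++ summary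
  else if summary ≠ "" then summary
  else if card_type ≠ "" then card_type
  else ""

def format_attachments_short_py_alt (atts : List (List (String × String))) : String :=
  if atts = [] then ""
  else
    let typed := (atts.map (fun it => (pvNormType it, it))).filterMap
      (fun p => p.1.map (fun t => (t, p.2)))
    let ts := typed.map (fun p => p.1)
    let images_count : Int := ts.count "image"
    let files_count : Int := (ts.count "file" : Int) + ts.count "doc" + ts.count "document"
    let cards := typed.filterMap (fun p => if p.1 = "system_card" then some (pvCardText p.2) else none)
    let others := ts.filter
      (fun t => ¬(t = "image" ∨ t = "file" ∨ t = "doc" ∨ t = "document" ∨ t = "system_card"))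
    let card_part : List String :=
      if cards ≠ [] then
        let summaries := cards.filter (fun s => s ≠ "")
        if summaries ≠ [] ∧ summaries.length ≤ 2 then ["系统卡片: " ++ PySem.Str.join " | " summaries]
        else ["系统卡片" ++ PySem.Int.toStr (cards.length : Int)]
      else []
    let parts :=
      (if images_count ≠ 0 then ["图片" ++ PySem.Int.toStr images_count] else [])
      ++ (if files_count ≠ 0 then ["文件" ++ PySem.Int.toStr files_count] else [])
      ++ card_part
      ++ (PySem.List.sorted (PySem.List.dedup others) (fun x => x) false).map
          (fun k => k ++ PySem.Int.toStr (others.count k : Int))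
    if parts = [] then ""
    else
      let out := "附件：" ++ PySem.Str.join "；" parts
      if 500 < PySem.Str.len out then PySem.Str.slice out none (some 497) ++ "..." else out

-- ===== PRECONDITION & SPEC =====
def Spec_format_attachments_short_py (atts : List (List (String × String))) (out : String) : Prop := out = format_attachments_short_py_alt atts
instance (atts : List (List (String × String))) (out : String) : Decidable (Spec_format_attachments_short_py atts out) := by unfold Spec_format_attachments_short_py; infer_instance

-- ===== CLAIM (what is proved, stated in full; the proofs are below) =====
def Claim_equal_format_attachments_short_py : Prop := ∀ (atts : List (List (String × String))), Dom_format_attachments_short_py atts → Spec_format_attachments_short_py atts (format_attachments_short_py atts)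

-- ===== LEMMAS AND PROOFS =====

-- B's `typed`, `ts`, `cards`, `others` lists as functions of the input (proof-side names).
def pvTyped (l : List (List (String × String))) : List (String × List (String × String)) :=
  (l.map (fun it => (pvNormType it, it))).filterMap (fun p => p.1.map (fun t => (t, p.2)))

def pvTs (l : List (List (String × String))) : List String := (pvTyped l).map (fun p => p.1)

def pvOthers (l : List (List (String × String))) : List String :=
  (pvTs l).filter
    (fun t => ¬(t = "image" ∨ t = "file" ∨ t = "doc" ∨ t = "document" ∨ t = "system_card"))

def pvCards (l : List (List (String × String))) : List String :=
  (pvTyped l).filterMap (fun p => if p.1 = "system_card" then some (pvCardText p.2) else none)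

theorem pvTyped_cons (it : List (String × String)) (l : List (List (String × String))) :
    pvTyped (it :: l) = match pvNormType it with
      | some t => (t, it) :: pvTyped l
      | none => pvTyped l := by
  unfold pvTyped
  rw [List.map_cons, List.filterMap_cons]
  cases pvNormType it <;> simp only [Option.map_some, Option.map_none]

-- A's loop body, characterised through B's classifier.
theorem pvStepA_eq (s : Int × Int × List String × PySem.Dict String Int)
    (it : List (String × String)) :
    pvStepA s it = match pvNormType it with
      | none => s
      | some t =>
        if t = "image" then (s.1 + 1, s.2.1, s.2.2.1, s.2.2.2)
        else if t = "file" ∨ t = "doc" ∨ t = "document" then (s.1, s.2.1 + 1, s.2.2.1, s.2.2.2)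
        else if t = "system_card" then (s.1, s.2.1, s.2.2.1 ++ [pvCardText it], s.2.2.2)
        else (s.1, s.2.1, s.2.2.1, s.2.2.2.insert t (s.2.2.2.getD t 0 + 1)) := by
  unfold pvStepA pvNormType pvCardText
  dsimp only
  set r := PySem.Str.lower (PySem.Str.strip (((PySem.Dict.ofList it).get? "type").getD "")) with hr
  by_cases c1 : r = "" ∧ ((PySem.Dict.ofList it).keys.any fun k => PySem.Str.startswith (PySem.Str.lower k) "meta") = true
  · rw [if_pos c1, if_pos c1]
  · rw [if_neg c1, if_neg c1]
    by_cases c2 : (if r = "" then "unknown" else r) = "meta" ∨ (if r = "" then "unknown" else r) = "metadata" ∨ PySem.Str.startswith (if r = "" then "unknown" else r) "meta_" = true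
    · rw [if_pos c2, if_pos c2]
    · rw [if_neg c2, if_neg c2]

theorem pvOthers_cons (it : List (String × String)) (l : List (List (String × String)))
    (t : String) (h : pvTs (it :: l) = t :: pvTs l) :
    pvOthers (it :: l) =
      (if t = "image" ∨ t = "file" ∨ t = "doc" ∨ t = "document" ∨ t = "system_card"
        then [] else [t]) ++ pvOthers l := by
  rw [pvOthers, h, List.filter_cons, pvOthers]
  by_cases hp : t = "image" ∨ t = "file" ∨ t = "doc" ∨ t = "document" ∨ t = "system_card"
  · rw [if_pos hp]; simp [hp]
  · rw [if_neg hp]; simp [hp]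

-- The loop invariant: A's four accumulators are exactly B's aggregates.
theorem pv_fold_inv (l : List (List (String × String)))
    (s : Int × Int × List String × PySem.Dict String Int) :
    l.foldl pvStepA s =
      (s.1 + ((pvTs l).count "image" : Int),
       s.2.1 + ((pvTs l).count "file" : Int) + ((pvTs l).count "doc" : Int) + ((pvTs l).count "document" : Int),
       s.2.2.1 ++ pvCards l,
       (pvOthers l).foldl (fun d t => d.insert t (d.getD t 0 + 1)) s.2.2.2) := by
  induction l generalizing s with
  | nil => simp [pvTs, pvCards, pvOthers, pvTyped]
  | cons it l ih =>
    rw [List.foldl_cons, pvStepA_eq]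
    have hty := pvTyped_cons it l
    cases h : pvNormType it with
    | none =>
      rw [h] at hty
      dsimp only at hty ⊢
      have hts : pvTs (it :: l) = pvTs l := by rw [pvTs, hty, pvTs]
      have hcards : pvCards (it :: l) = pvCards l := by rw [pvCards, hty, pvCards]
      have hoth : pvOthers (it :: l) = pvOthers l := by rw [pvOthers, hts, pvOthers]
      rw [ih, hts, hcards, hoth]
    | some t =>
      rw [h] at hty
      dsimp only at hty ⊢
      have hts : pvTs (it :: l) = t :: pvTs l := by rw [pvTs, hty, List.map_cons, pvTs]
      have hoth0 := pvOthers_cons it l t hts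
      have hcards : pvCards (it :: l) =
          (if t = "system_card" then [pvCardText it] else []) ++ pvCards l := by
        rw [pvCards, hty, List.filterMap_cons, pvCards]
        split_ifs <;> simp
      by_cases h1 : t = "image"
      · rw [if_pos h1, ih]
        subst h1
        have hoth : pvOthers (it :: l) = pvOthers l := by rw [hoth0]; simp
        refine Prod.ext ?_ (Prod.ext ?_ (Prod.ext ?_ ?_)) <;>
          simp [hts, hcards, hoth] <;> omega
      rw [if_neg h1]
      by_cases h2 : t = "file" ∨ t = "doc" ∨ t = "document"
      · rw [if_pos h2, ih]
        have hoth : pvOthers (it :: l) = pvOthers l := by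
          rw [hoth0]; rcases h2 with h | h | h <;> subst h <;> simp
        refine Prod.ext ?_ (Prod.ext ?_ (Prod.ext ?_ ?_)) <;>
          rcases h2 with h2 | h2 | h2 <;> subst h2 <;>
          simp [hts, hcards, hoth] <;> omega
      rw [if_neg h2]
      obtain ⟨h2a, h2bc⟩ := not_or.mp h2
      obtain ⟨h2b, h2c⟩ := not_or.mp h2bc
      by_cases h3 : t = "system_card"
      · rw [if_pos h3, ih]
        have hoth : pvOthers (it :: l) = pvOthers l := by rw [hoth0]; subst h3; simp
        subst h3
        refine Prod.ext ?_ (Prod.ext ?_ (Prod.ext ?_ ?_)) <;>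
          simp [hts, hcards, hoth]
      rw [if_neg h3, ih]
      have hoth : pvOthers (it :: l) = t :: pvOthers l := by
        rw [hoth0]; simp [h1, h2a, h2b, h2c, h3]
      refine Prod.ext ?_ (Prod.ext ?_ (Prod.ext ?_ ?_)) <;>
        simp [hts, hcards, hoth, h1, h2a, h2b, h2c, h3, List.foldl_cons]

-- The shared formatting tail: A's sequential `parts` appends over the counter dict
-- equal B's segment concatenation over the raw `others` list.
theorem pv_tail_eq (I F : Int) (C O : List String) :
  (let parts : List String := []
   let parts := if I ≠ 0 then parts ++ ["图片" ++ PySem.Int.toStr I] else parts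
   let parts := if F ≠ 0 then parts ++ ["文件" ++ PySem.Int.toStr F] else parts
   let parts := if C ≠ [] then
       let summaries := C.filter (fun s => s ≠ "")
       if summaries ≠ [] ∧ summaries.length ≤ 2 then parts ++ ["系统卡片: " ++ PySem.Str.join " | " summaries]
       else parts ++ ["系统卡片" ++ PySem.Int.toStr (C.length : Int)]
     else parts
   let parts := if (PySem.Dict.counter O).items ≠ [] then
       parts ++ (PySem.List.sorted (PySem.Dict.counter O).keys (fun x => x) false).map
         (fun k => k ++ PySem.Int.toStr ((PySem.Dict.counter O).getD k 0))
     else parts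
   if parts = [] then "" else
     let out := "附件：" ++ PySem.Str.join "；" parts
     if 500 < PySem.Str.len out then PySem.Str.slice out none (some 497) ++ "..." else out)
  =
  (let card_part : List String := if C ≠ [] then
      let summaries := C.filter (fun s => s ≠ "")
      if summaries ≠ [] ∧ summaries.length ≤ 2 then ["系统卡片: " ++ PySem.Str.join " | " summaries]
      else ["系统卡片" ++ PySem.Int.toStr (C.length : Int)]
    else []
   let parts := (if I ≠ 0 then ["图片" ++ PySem.Int.toStr I] else [])
     ++ (if F ≠ 0 then ["文件" ++ PySem.Int.toStr F] else [])
     ++ card_part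
     ++ (PySem.List.sorted (PySem.List.dedup O) (fun x => x) false).map (fun k => k ++ PySem.Int.toStr (O.count k : Int))
   if parts = [] then "" else
     let out := "附件：" ++ PySem.Str.join "；" parts
     if 500 < PySem.Str.len out then PySem.Str.slice out none (some 497) ++ "..." else out) := by
  dsimp only
  rw [PySem.Dict.keys_counter, ← PySem.List.dedup_eq_ofList]
  have hmapfun : (fun k => k ++ PySem.Int.toStr ((PySem.Dict.counter O).getD k 0))
      = (fun k => k ++ PySem.Int.toStr ((O.count k : Nat) : Int)) := by
    funext k; rw [PySem.Dict.getD_counter]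
  rw [hmapfun]
  apply congrArg (fun parts : List String => if parts = [] then "" else
    (let out := "附件：" ++ PySem.Str.join "；" parts
     if 500 < PySem.Str.len out then PySem.Str.slice out none (some 497) ++ "..." else out))
  by_cases hi : (PySem.Dict.counter O).items = []
  · have hd : PySem.List.dedup O = [] := by
      rw [PySem.List.dedup_eq_ofList]
      have := PySem.Dict.items_counter (xs := O)
      rw [hi] at this
      exact (List.map_eq_nil_iff.mp this.symm)
    rw [hd]
    simp only [hi, ne_eq, not_true_eq_false, if_false]
    split_ifs <;> simp [PySem.List.sorted]
  · rw [if_pos hi]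
    split_ifs <;> simp

theorem pv_main (atts : List (List (String × String))) :
    format_attachments_short_py atts = format_attachments_short_py_alt atts := by
  by_cases hnil : atts = []
  · rw [format_attachments_short_py, format_attachments_short_py_alt, if_pos hnil, if_pos hnil]
  · rw [format_attachments_short_py, format_attachments_short_py_alt, if_neg hnil, if_neg hnil]
    dsimp only
    rw [pv_fold_inv]
    dsimp only
    rw [← pvTyped, ← pvTs, ← pvCards, ← pvOthers]
    rw [PySem.Dict.foldl_insert_getD_add_one_eq_counter]
    rw [zero_add, zero_add, List.nil_append]
    exact pv_tail_eq _ _ (pvCards atts) (pvOthers atts)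

-- ===== VERDICT (by name: the statement is the Claim_ definition above) =====
theorem format_attachments_short_py_spec : Claim_equal_format_attachments_short_py := by
  intro atts _
  unfold Spec_format_attachments_short_py
  exact pv_main atts
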